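-- pv_equiv track=rewrite | github.com/pypi-data/pypi-mirror-403 | packages/folprover-mcp/folprover_mcp-0.1.0-py3-none-any.whl/folprover_mcp/provers.py | _extract_proof
-- ===== SOURCE A (Python) =====
-- from typing import List, Optional, Tuple
--
-- def _extract_proof(output: str) -> Optional[str]:
--     """Extract proof from Vampire output."""
--     lines = output.split('\n')
--     proof_lines = []
--     in_proof = False
--
--     for line in lines:
--         if 'Refutation found' in line:
--             in_proof = True
--         if in_proof:
--             proof_lines.append(line)
--         if in_proof and line.strip() == '':
--             break
--
--     return '\n'.join(proof_lines) if proof_lines else None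
-- ===== SOURCE B (Python) =====
-- from typing import Optional
--
-- def _extract_proof(output: str) -> Optional[str]:
--     """Extract proof from Vampire output (find-then-slice)."""
--     lines = output.split('\n')
--     start = next((i for i, l in enumerate(lines) if 'Refutation found' in l), None)
--     if start is None:
--         return None
--     tail = lines[start:]
--     k = next((i for i, l in enumerate(tail) if l.strip() == ''), None)
--     if k is not None:
--         return '\n'.join(tail[:k + 1])
--     return '\n'.join(tail)
-- ===== Notes on version B (the rewrite author's own statement) =====
-- stated objective: idiomatic
-- what changed: Replaces A's single flag-and-accumulate loop (in_proof flag, append-under-flag, break on blank) with a find-then-slice decomposition: locate the first line containing the refutation marker, then scan for the first blank line from there and join the slice.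
import Mathlib
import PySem

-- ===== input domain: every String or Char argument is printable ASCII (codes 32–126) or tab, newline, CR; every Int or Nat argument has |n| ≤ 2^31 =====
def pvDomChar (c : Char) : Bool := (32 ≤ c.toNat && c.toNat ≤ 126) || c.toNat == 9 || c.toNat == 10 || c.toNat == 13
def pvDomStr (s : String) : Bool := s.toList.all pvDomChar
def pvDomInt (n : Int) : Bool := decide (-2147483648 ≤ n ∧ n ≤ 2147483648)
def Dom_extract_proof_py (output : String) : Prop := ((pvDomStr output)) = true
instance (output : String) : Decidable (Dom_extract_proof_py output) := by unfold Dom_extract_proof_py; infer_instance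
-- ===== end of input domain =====

-- B replaces A's flag-and-accumulate loop by find-start-index then scan-to-blank then slice; objective: idiomatic, same O(n) cost.

-- ===== PORT A =====
-- A's for-loop: state (accumulated proof lines, in_proof flag); break after appending a blank line while in_proof.
def extractGoA : List String → List String → Bool → List String
  | [], acc, _ => acc
  | l :: rest, acc, inp =>
    let inp' := inp || PySem.Str.isIn "Refutation found" l
    let acc' := if inp' then acc ++ [l] else acc
    if inp' && (PySem.Str.strip l == "") then acc' else extractGoA rest acc' inp'

def extract_proof_py (output : String) : Option String :=
  let lines := (PySem.Str.split? output "\n").getD []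
  let proofLines := extractGoA lines [] false
  if proofLines.isEmpty then none else some (PySem.Str.join "\n" proofLines)

-- ===== PORT B =====
-- next((i for i, l in enumerate(lines) if 'Refutation found' in l), None)
def extractFindStart : List String → Option Nat
  | [] => none
  | l :: rest =>
    if PySem.Str.isIn "Refutation found" l then some 0
    else (extractFindStart rest).map (· + 1)

-- next((i for i, l in enumerate(tail) if l.strip() == ''), None)
def extractFindBlank : List String → Option Nat
  | [] => none
  | l :: rest =>
    if PySem.Str.strip l == "" then some 0
    else (extractFindBlank rest).map (· + 1)

def extract_proof_py_alt (output : String) : Option String :=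
  let lines := (PySem.Str.split? output "\n").getD []
  match extractFindStart lines with
  | none => none
  | some start =>
    let tail := lines.drop start
    match extractFindBlank tail with
    | some k => some (PySem.Str.join "\n" (tail.take (k + 1)))
    | none => some (PySem.Str.join "\n" tail)

-- ===== PRECONDITION & SPEC =====
def Spec_extract_proof_py (output : String) (out : Option String) : Prop := out = extract_proof_py_alt output
instance (output : String) (out : Option String) : Decidable (Spec_extract_proof_py output out) := by unfold Spec_extract_proof_py; infer_instance

-- ===== CLAIM (what is proved, stated in full; the proofs are below) =====
def Claim_equal_extract_proof_py : Prop := ∀ (output : String), Dom_extract_proof_py output → Spec_extract_proof_py output (extract_proof_py output)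

-- ===== LEMMAS AND PROOFS =====

-- the lines A collects once the flag is set: everything up to and including the first blank line
def extractTakeThrough : List String → List String
  | [] => []
  | l :: rest => if PySem.Str.strip l == "" then [l] else l :: extractTakeThrough rest

theorem extractGoA_true (ls : List String) : ∀ acc, extractGoA ls acc true = acc ++ extractTakeThrough ls := by
  induction ls with
  | nil => intro acc; simp [extractGoA, extractTakeThrough]
  | cons l rest ih =>
    intro acc
    simp only [extractGoA, extractTakeThrough, Bool.true_or, Bool.true_and]
    by_cases h : (PySem.Str.strip l == "") = true
    · simp [h]
    · simp only [Bool.not_eq_true] at h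
      simp [h, ih]

theorem extractTakeThrough_eq (ls : List String) :
    extractTakeThrough ls = (match extractFindBlank ls with
      | some k => ls.take (k + 1)
      | none => ls) := by
  induction ls with
  | nil => simp [extractTakeThrough, extractFindBlank]
  | cons l rest ih =>
    by_cases h : (PySem.Str.strip l == "") = true
    · simp [extractTakeThrough, extractFindBlank, h]
    · simp only [Bool.not_eq_true] at h
      cases hfb : extractFindBlank rest with
      | none => simp [extractTakeThrough, extractFindBlank, h, hfb, hfb ▸ ih]
      | some k => simp [extractTakeThrough, extractFindBlank, h, hfb, hfb ▸ ih]

theorem extractGoA_false (ls : List String) :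
    extractGoA ls [] false = (match extractFindStart ls with
      | none => []
      | some s => extractTakeThrough (ls.drop s)) := by
  induction ls with
  | nil => simp [extractGoA, extractFindStart]
  | cons l rest ih =>
    by_cases h : (PySem.Str.isIn "Refutation found" l) = true
    · replace h := by simpa using h
      by_cases hb : PySem.Str.strip l = ""
      · simp [extractGoA, extractFindStart, extractTakeThrough, h, hb]
      · simp [extractGoA, extractFindStart, extractTakeThrough, extractGoA_true, h, hb]
    · simp only [Bool.not_eq_true] at h
      replace h := by simpa using h
      have hstep : extractGoA (l :: rest) [] false = extractGoA rest [] false := by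
        simp [extractGoA, h]
      rw [hstep, ih]
      cases hfs : extractFindStart rest with
      | none => simp [extractFindStart, h, hfs]
      | some s => simp [extractFindStart, h, hfs]

theorem extractFindStart_lt (ls : List String) (s : Nat) (h : extractFindStart ls = some s) :
    s < ls.length := by
  induction ls generalizing s with
  | nil => simp [extractFindStart] at h
  | cons l rest ih =>
    simp only [extractFindStart] at h
    split at h
    · cases h; simp
    · cases hfs : extractFindStart rest with
      | none => simp [hfs] at h
      | some t =>
        simp [hfs] at h
        subst h
        simpa [Nat.add_lt_add_iff_right] using ih t hfs

theorem extractTakeThrough_ne_nil (l : String) (rest : List String) :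
    extractTakeThrough (l :: rest) ≠ [] := by
  simp only [extractTakeThrough]
  split <;> simp

-- ===== VERDICT (by name: the statement is the Claim_ definition above) =====
theorem extract_proof_py_spec : Claim_equal_extract_proof_py := by
  intro output _
  unfold Spec_extract_proof_py extract_proof_py extract_proof_py_alt
  simp only [extractGoA_false]
  cases hfs : extractFindStart ((PySem.Str.split? output "\n").getD []) with
  | none => simp
  | some s =>
    have hlt := extractFindStart_lt _ _ hfs
    have hdrop : ∃ x xs, ((PySem.Str.split? output "\n").getD []).drop s = x :: xs := by
      have : ((PySem.Str.split? output "\n").getD []).drop s ≠ [] := by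
        simp [List.drop_eq_nil_iff]; omega
      exact List.exists_cons_of_ne_nil this
    obtain ⟨x, xs, hx⟩ := hdrop
    simp only [hx]
    have hne := extractTakeThrough_ne_nil x xs
    rw [if_neg (by simpa using hne), extractTakeThrough_eq]
    cases hfb : extractFindBlank (x :: xs) <;> simp
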